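-- pv_equiv track=rewrite | github.com/rossoandoy/ERPBOK | 02_phase1_mvp/src/erpfts/services/search_service.py | _find_keyword_positions
-- ===== SOURCE A (Python) =====
-- from typing import List, Dict, Any, Optional, Tuple
--
-- def _find_keyword_positions(
--
--     content: str,
--     keywords: List[str]
-- ) -> List[Tuple[int, int]]:
--     """
--     Find positions of keywords in content for highlighting.
--
--     Args:
--         content: Text content
--         keywords: List of keywords to find
--
--     Returns:
--         List of (start, end) positions
--     """
--     positions = []
--     content_lower = content.lower()
--
--     for keyword in keywords:
--         start_pos = 0
--         while True:
--             pos = content_lower.find(keyword, start_pos)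
--             if pos == -1:
--                 break
--
--             positions.append((pos, pos + len(keyword)))
--             start_pos = pos + 1
--
--     # Sort and merge overlapping positions
--     positions.sort()
--     merged = []
--     for start, end in positions:
--         if merged and start <= merged[-1][1]:
--             # Overlapping - merge
--             merged[-1] = (merged[-1][0], max(merged[-1][1], end))
--         else:
--             merged.append((start, end))
--
--     return merged
-- ===== SOURCE B (Python) =====
-- from typing import List, Tuple
--
--
-- def _find_keyword_positions(
--     content: str,
--     keywords: List[str]
-- ) -> List[Tuple[int, int]]:
--     """Single left-to-right scan over text positions: at each position take the
--     longest keyword match and merge it into the result on the fly (no per-keyword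
--     find loops, no sort of the collected matches)."""
--     content_lower = content.lower()
--     n = len(content_lower)
--     kws = sorted(keywords, key=len)  # ascending length: last match is the longest
--     merged = []
--     for i in range(n + 1):
--         end = -1
--         for k in kws:
--             if content_lower.startswith(k, i):
--                 end = i + len(k)
--         if end >= 0:
--             if merged and i <= merged[-1][1]:
--                 last = merged[-1]
--                 if end > last[1]:
--                     merged[-1] = (last[0], end)
--             else:
--                 merged.append((i, end))
--     return merged
-- ===== Notes on version B (the rewrite author's own statement) =====
-- stated objective: alternative
-- what changed: A runs a find-loop per keyword, collects all match intervals, sorts them and merges in a final pass; B makes a single left-to-right scan over text positions (keywords pre-sorted by length once), taking the longest match at each position and merging it into the result on the fly, with no match list, no sort and no separate merge pass.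
import Mathlib
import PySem

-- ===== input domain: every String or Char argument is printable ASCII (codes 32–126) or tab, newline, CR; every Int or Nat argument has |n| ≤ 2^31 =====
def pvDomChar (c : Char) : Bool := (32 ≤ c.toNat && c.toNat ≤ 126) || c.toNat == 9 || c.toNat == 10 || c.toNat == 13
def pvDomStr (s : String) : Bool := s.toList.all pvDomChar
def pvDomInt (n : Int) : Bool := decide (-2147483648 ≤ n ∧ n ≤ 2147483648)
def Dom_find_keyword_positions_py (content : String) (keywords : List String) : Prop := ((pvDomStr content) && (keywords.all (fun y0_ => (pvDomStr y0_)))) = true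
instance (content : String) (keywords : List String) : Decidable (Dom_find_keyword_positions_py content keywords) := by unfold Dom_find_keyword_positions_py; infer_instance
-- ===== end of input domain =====

-- B replaces A's per-keyword find loops + sort + merge pass by one left-to-right scan over
-- text positions that merges the longest match at each position on the fly (objective: alternative).


-- ===== PORT A =====
-- A's inner `while True: pos = content_lower.find(keyword, start_pos)` loop, fuel-bounded:
-- fuel = len(content_lower) + 1 always suffices (each found pos is strictly larger than the last,
-- and all lie in 0..len, so at most len+1 matches are ever produced).
def pvFindLoopA (cl kw : String) (startPos : Int) : Nat → List (Int × Int)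
  | 0 => []
  | fuel + 1 =>
    let pos := PySem.Str.findFrom cl kw startPos none
    if pos = -1 then []
    else (pos, pos + PySem.Str.len kw) :: pvFindLoopA cl kw (pos + 1) fuel

-- body of A's merge loop (merged is kept last-interval-first; Python appends/updates at the back,
-- so the port reverses at the end)
def pvMergeStepA (merged : List (Int × Int)) (p : Int × Int) : List (Int × Int) :=
  match merged with
  | [] => [p]
  | (ls, le) :: rest => if p.1 ≤ le then (ls, max le p.2) :: rest else p :: (ls, le) :: rest

def find_keyword_positions_py (content : String) (keywords : List String) : List (Int × Int) :=
  let contentLower := PySem.Str.lower content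
  let positions := keywords.foldl
    (fun acc kw => acc ++ pvFindLoopA contentLower kw 0 (contentLower.toList.length + 1)) []
  let sortedPositions := PySem.List.sorted2 positions (fun p => p.1) (fun p => p.2) false
  (sortedPositions.foldl pvMergeStepA []).reverse

-- ===== PORT B =====
-- body of B's scan loop: at position i compute the largest match end (kws is sorted by length,
-- so the last matching keyword gives it; -1 = no match; `cl.startswith(k, i)` for 0 ≤ i ≤ len(cl)
-- is exactly `k` being a prefix of `cl[i:]`), then merge (i, end) into the running result
-- (kept last-interval-first like in port A; reversed at the end).
def pvScanStepB (cl : List Char) (kws : List String) (merged : List (Int × Int)) (i : Nat) :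
    List (Int × Int) :=
  let e := kws.foldl
    (fun e k => if PySem.Chars.startswith (cl.drop i) k.toList then (i : Int) + PySem.Str.len k else e)
    (-1)
  if 0 ≤ e then
    match merged with
    | [] => [((i : Int), e)]
    | (ls, le) :: rest =>
      if (i : Int) ≤ le then (if le < e then (ls, e) :: rest else (ls, le) :: rest)
      else ((i : Int), e) :: (ls, le) :: rest
  else merged

def find_keyword_positions_py_alt (content : String) (keywords : List String) : List (Int × Int) :=
  let cl := (PySem.Str.lower content).toList
  let kws := PySem.List.sorted keywords (fun k => PySem.Str.len k) false
  ((List.range (cl.length + 1)).foldl (pvScanStepB cl kws) []).reverse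

-- ===== PRECONDITION & SPEC =====
def Spec_find_keyword_positions_py (content : String) (keywords : List String) (out : List (Int × Int)) : Prop := out = find_keyword_positions_py_alt content keywords
instance (content : String) (keywords : List String) (out : List (Int × Int)) : Decidable (Spec_find_keyword_positions_py content keywords out) := by unfold Spec_find_keyword_positions_py; infer_instance

-- ===== CLAIM (what is proved, stated in full; the proofs are below) =====
def Claim_equal_find_keyword_positions_py : Prop := ∀ (content : String) (keywords : List String), Dom_find_keyword_positions_py content keywords → Spec_find_keyword_positions_py content keywords (find_keyword_positions_py content keywords)

-- ===== LEMMAS AND PROOFS =====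

-- abbreviations for the proof
def pvMatch (cl : List Char) (k : String) (i : Nat) : Bool :=
  PySem.Chars.startswith (cl.drop i) k.toList

def pvPair (k : String) (i : Nat) : Int × Int := ((i : Int), (i : Int) + PySem.Str.len k)

-- all matches of keyword k, in increasing position (what A's find loop produces)
def pvOcc (cl : List Char) (k : String) : List (Int × Int) :=
  ((List.range (cl.length + 1)).filter (pvMatch cl k)).map (pvPair k)

-- all matches at position i, keywords in ascending-length order
def pvGrp (cl : List Char) (kws : List String) (i : Nat) : List (Int × Int) :=
  (kws.filter (fun k => pvMatch cl k i)).map (fun k => pvPair k i)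

-- the position-major match list (equal to A's sorted match list)
def pvG (cl : List Char) (kws : List String) : List (Int × Int) :=
  (List.range (cl.length + 1)).flatMap (pvGrp cl kws)

-- find with a start index past the end of the string yields -1 (CPython quirk, kept by PySem)
theorem pvFindFrom_past (s sub : List Char) (k : Nat) (h : s.length < k) :
    PySem.Chars.findFrom s sub (k : Int) none = -1 := by
  simp [PySem.Chars.findFrom, show ¬((k : Int) < 0) from by omega,
    show (s.length : Int) < (k : Int) from by exact_mod_cast h]

-- characterization of A's find loop: it lists every match position from s upward, in order
theorem pvFindLoopA_eq (cl kw : String) (fuel s : Nat)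
    (hs : s ≤ cl.toList.length + 1) (hf : cl.toList.length + 1 - s ≤ fuel) :
    pvFindLoopA cl kw (s : Int) fuel
      = ((List.range' s (cl.toList.length + 1 - s)).filter (pvMatch cl.toList kw)).map
          (pvPair kw) := by
  induction fuel generalizing s with
  | zero =>
    have h0 : cl.toList.length + 1 - s = 0 := by omega
    rw [h0]
    rfl
  | succ fuel ih =>
    by_cases hs1 : s = cl.toList.length + 1
    · subst hs1
      rw [pvFindLoopA]
      simp only [PySem.Str.findFrom_eq]
      rw [pvFindFrom_past _ _ _ (by omega)]
      norm_num
    · have hsn : s ≤ cl.toList.length := by omega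
      rw [pvFindLoopA]
      simp only [PySem.Str.findFrom_eq]
      rw [PySem.Chars.findFrom_natCast _ _ s hsn]
      by_cases hneg : PySem.Chars.find (cl.toList.drop s) kw.toList = -1
      · rw [if_pos (show (if PySem.Chars.find (cl.toList.drop s) kw.toList = -1 then (-1:Int)
              else (s : Int) + PySem.Chars.find (cl.toList.drop s) kw.toList) = -1 by rw [hneg]; norm_num)]
        have hnin : ¬ kw.toList <:+: cl.toList.drop s :=
          (PySem.Chars.find_eq_neg_one_iff _ _).mp hneg
        have hfil : (List.range' s (cl.toList.length + 1 - s)).filter (pvMatch cl.toList kw) = [] := by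
          rw [List.filter_eq_nil_iff]
          intro a ha hmatch
          obtain ⟨m, -, rfl⟩ := List.mem_range'.mp ha
          rw [pvMatch, PySem.Chars.startswith_iff] at hmatch
          apply hnin
          have hdd : cl.toList.drop (s + 1 * m) = (cl.toList.drop s).drop m := by
            rw [List.drop_drop]
            congr 1
            omega
          rw [hdd] at hmatch
          exact hmatch.isInfix.trans ((cl.toList.drop s).drop_suffix m).isInfix
        rw [hfil, List.map_nil]
      · rw [if_neg hneg]
        set p := PySem.Chars.find (cl.toList.drop s) kw.toList with hp
        have hp0 : (0 : Int) ≤ p := by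
          have := PySem.Chars.neg_one_le_find (cl.toList.drop s) kw.toList
          rw [← hp] at this
          omega
        have hplen : p ≤ ((cl.toList.drop s).length : Int) := by
          rw [hp]
          exact PySem.Chars.find_le_length _ _
        set j := p.toNat with hj
        have hjp : (j : Int) = p := Int.toNat_of_nonneg hp0
        have hjn : s + j ≤ cl.toList.length := by
          rw [List.length_drop] at hplen
          omega
        obtain ⟨hpre, hmin⟩ := PySem.Chars.find_spec (s := cl.toList.drop s) (sub := kw.toList) hp0
        rw [← hp, ← hj] at hpre hmin
        rw [List.drop_drop] at hpre
        rw [if_neg (show ¬((s : Int) + p = -1) by omega)]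
        have hsplit : List.range' s (cl.toList.length + 1 - s)
            = List.range' s j ++ ((s + j) :: List.range' (s + j + 1) (cl.toList.length - s - j)) := by
          have h1 : cl.toList.length + 1 - s = j + (cl.toList.length - s - j + 1) := by omega
          rw [h1, ← List.range'_append (s := s) (m := j) (n := cl.toList.length - s - j + 1) (step := 1)]
          congr 1
          rw [Nat.one_mul, List.range'_succ]
        have hfil1 : (List.range' s j).filter (pvMatch cl.toList kw) = [] := by
          rw [List.filter_eq_nil_iff]
          intro a ha hmatch
          obtain ⟨m, hm, rfl⟩ := List.mem_range'.mp ha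
          rw [pvMatch, PySem.Chars.startswith_iff] at hmatch
          have hdd : cl.toList.drop (s + 1 * m) = (cl.toList.drop s).drop m := by
            rw [List.drop_drop]
            congr 1
            omega
          rw [hdd] at hmatch
          exact hmin m hm hmatch
        have hhead : pvMatch cl.toList kw (s + j) = true := by
          rw [pvMatch, PySem.Chars.startswith_iff]
          exact hpre
        rw [hsplit, List.filter_append, hfil1, List.nil_append,
          List.filter_cons_of_pos hhead, List.map_cons]
        have harg : (s : Int) + p + 1 = ((s + j + 1 : Nat) : Int) := by push_cast [hjp]; ring
        rw [harg, ih (s + j + 1) (by omega) (by omega)]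
        have hlen : cl.toList.length + 1 - (s + j + 1) = cl.toList.length - s - j := by omega
        rw [hlen]
        congr 1
        rw [pvPair]
        have h1 : ((s + j : Nat) : Int) = (s : Int) + p := by push_cast [hjp]; ring
        rw [h1]

-- A's accumulated positions list = keyword-major flatMap of matches
theorem pvPositions_eq (cl : String) (keywords : List String) :
    keywords.foldl (fun acc kw => acc ++ pvFindLoopA cl kw 0 (cl.toList.length + 1)) []
      = keywords.flatMap (pvOcc cl.toList) := by
  rw [PySem.List.foldl_append_eq_flatMap, List.nil_append]
  congr 1
  funext kw
  have h := pvFindLoopA_eq cl kw (cl.toList.length + 1) 0 (by omega) (by omega)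
  simpa [pvOcc, List.range_eq_range'] using h

-- filter-then-map as a flatMap of optional singletons (to swap the two iteration orders)
theorem pvFilterMap_flatMap {α β : Type} (p : α → Bool) (f : α → β) (l : List α) :
    (l.filter p).map f = l.flatMap (fun x => if p x then [f x] else []) := by
  induction l with
  | nil => rfl
  | cons a t ih => by_cases h : p a <;> simp [h, ih]

-- the keyword-major and position-major match lists are permutations of each other
theorem pvPerm (cl : List Char) (keywords kws : List String) (hk : kws.Perm keywords) :
    (keywords.flatMap (pvOcc cl)).Perm (pvG cl kws) := by
  rw [← Multiset.coe_eq_coe]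
  have hocc : pvOcc cl = fun k =>
      (List.range (cl.length + 1)).flatMap (fun i => if pvMatch cl k i then [pvPair k i] else []) := by
    funext k; exact pvFilterMap_flatMap _ _ _
  have hgrp : pvGrp cl kws = fun i =>
      kws.flatMap (fun k => if pvMatch cl k i then [pvPair k i] else []) := by
    funext i; exact pvFilterMap_flatMap _ _ _
  have hkcoe : (kws : Multiset String) = (keywords : Multiset String) := Multiset.coe_eq_coe.mpr hk
  calc ((keywords.flatMap (pvOcc cl) : List (Int × Int)) : Multiset (Int × Int))
      = (keywords : Multiset String).bind (fun k => ((pvOcc cl k : List (Int × Int)) : Multiset (Int × Int))) :=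
        (Multiset.coe_bind _ _).symm
    _ = (keywords : Multiset String).bind (fun k => ((List.range (cl.length + 1) : List Nat) : Multiset Nat).bind
          (fun i => ((if pvMatch cl k i then [pvPair k i] else [] : List (Int × Int)) : Multiset (Int × Int)))) := by
        simp only [hocc, Multiset.coe_bind]
    _ = ((List.range (cl.length + 1) : List Nat) : Multiset Nat).bind
          (fun i => (keywords : Multiset String).bind
            (fun k => ((if pvMatch cl k i then [pvPair k i] else [] : List (Int × Int)) : Multiset (Int × Int)))) :=
        Multiset.bind_bind _ _
    _ = ((List.range (cl.length + 1) : List Nat) : Multiset Nat).bind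
          (fun i => ((pvGrp cl kws i : List (Int × Int)) : Multiset (Int × Int))) := by
        simp only [hgrp, ← hkcoe, Multiset.coe_bind]
    _ = ((pvG cl kws : List (Int × Int)) : Multiset (Int × Int)) := by
        rw [pvG]; exact Multiset.coe_bind _ _

-- the position-major list is sorted (lexicographically non-decreasing)
theorem pvG_pairwise (cl : List Char) (keywords : List String) :
    (pvG cl (PySem.List.sorted keywords (fun k => PySem.Str.len k) false)).Pairwise
      (fun a b => toLex a ≤ toLex b) := by
  rw [pvG, List.pairwise_flatMap]
  constructor
  · intro i _
    rw [pvGrp, List.pairwise_map]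
    refine ((PySem.List.sorted_pairwise keywords (fun k => PySem.Str.len k)).filter _).imp ?_
    intro a b hab
    rw [Prod.Lex.toLex_le_toLex]
    exact Or.inr ⟨rfl, by simp only [pvPair]; omega⟩
  · refine List.pairwise_lt_range.imp ?_
    intro i j hij x hx y hy
    rw [pvGrp, List.mem_map] at hx hy
    obtain ⟨a, -, rfl⟩ := hx
    obtain ⟨b, -, rfl⟩ := hy
    rw [Prod.Lex.toLex_le_toLex]
    exact Or.inl (by simp only [pvPair]; exact_mod_cast hij)

-- Python's tuple sort = sort by the lexicographic key
theorem pvSorted2_eq_sorted_toLex (xs : List (Int × Int)) :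
    PySem.List.sorted2 xs (fun p => p.1) (fun p => p.2) false
      = PySem.List.sorted xs (fun p => toLex p) false := by
  rw [PySem.List.sorted_eq_foldl_insertBy]
  simp only [PySem.List.sorted2]
  congr 1
  funext acc x
  congr 1
  funext a b
  by_cases h1 : a.1 < b.1 <;> by_cases h2 : b.1 < a.1 <;> by_cases h3 : a.2 < b.2 <;>
    simp [h1, h2, h3, Prod.Lex.toLex_lt_toLex] <;> omega

-- a lexicographically non-decreasing rearrangement of xs IS sorted(xs) (ties are identical pairs)
theorem pvSorted_eq_of_perm_of_pairwise (xs ys : List (Int × Int)) (hperm : ys.Perm xs)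
    (hpw : ys.Pairwise (fun a b => toLex a ≤ toLex b)) :
    PySem.List.sorted xs (fun p => toLex p) false = ys := by
  apply List.Perm.eq_of_pairwise (le := fun a b : Int × Int => toLex a ≤ toLex b)
  · intro a b _ _ hab hba
    exact toLex.injective (le_antisymm hab hba)
  · exact PySem.List.sorted_pairwise xs (fun p => toLex p)
  · exact hpw
  · exact (PySem.List.sorted_perm xs _ _).trans hperm.symm

-- merging two intervals that start at the same position i absorbs the smaller end
theorem pvMergeAbsorb (acc : List (Int × Int)) (i e e' : Int) (hie : i ≤ e) (hee : e ≤ e') :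
    pvMergeStepA (pvMergeStepA acc (i, e)) (i, e') = pvMergeStepA acc (i, e') := by
  cases acc with
  | nil =>
    simp only [pvMergeStepA, if_pos hie]
    rw [max_eq_right hee]
  | cons hd rest =>
    obtain ⟨ls, le⟩ := hd
    by_cases h : i ≤ le
    · simp only [pvMergeStepA, if_pos h]
      rw [if_pos (le_trans h (le_max_left le e))]
      have : max (max le e) e' = max le e' := by omega
      rw [this]
    · simp only [pvMergeStepA, if_neg h]
      rw [if_pos hie, max_eq_right hee]

-- folding A's merge step over one same-position group = one merge step with the largest end
theorem pvMergeGroup (es : List Int) (i : Int) (acc : List (Int × Int))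
    (hall : ∀ e ∈ es, i ≤ e) (hpw : es.Pairwise (· ≤ ·)) :
    List.foldl pvMergeStepA acc (es.map (fun e => (i, e)))
      = match es.getLast? with
        | none => acc
        | some e => pvMergeStepA acc (i, e) := by
  induction es generalizing acc with
  | nil => simp
  | cons e tail ih =>
    cases tail with
    | nil => simp
    | cons e' rest =>
      have he : i ≤ e := hall e (by simp)
      have hpw' := (List.pairwise_cons.mp hpw).2
      have hall' : ∀ x ∈ e' :: rest, i ≤ x := fun x hx => hall x (List.mem_cons_of_mem _ hx)
      rw [List.map_cons, List.foldl_cons, ih (pvMergeStepA acc (i, e)) hall' hpw']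
      obtain ⟨em, hem⟩ : ∃ em, (e' :: rest).getLast? = some em := by
        cases hL : (e' :: rest).getLast? with
        | none => exact absurd (List.getLast?_eq_none_iff.mp hL) (by simp)
        | some em => exact ⟨em, rfl⟩
      have hmem : em ∈ e' :: rest := List.mem_of_getLast? hem
      have heem : e ≤ em := (List.pairwise_cons.mp hpw).1 em hmem
      rw [List.getLast?_cons_cons, hem]
      exact pvMergeAbsorb acc i e em he heem

-- B's inner keyword loop = last element of the filtered end list (or -1)
theorem pvInnerFold {α : Type} (l : List α) (p : α → Bool) (f : α → Int) (init : Int) :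
    l.foldl (fun e k => if p k then f k else e) init = ((l.filter p).map f).getLastD init := by
  induction l generalizing init with
  | nil => rfl
  | cons a t ih =>
    rw [List.foldl_cons]
    by_cases h : p a = true
    · rw [if_pos h, ih, List.filter_cons_of_pos h, List.map_cons, List.getLastD_cons]
    · rw [if_neg h, ih, List.filter_cons_of_neg (by simpa using h)]

-- merging the sorted position-major list = B's single scan
theorem pvMerge_G_eq_scan (cl : List Char) (kws : List String)
    (hpw : kws.Pairwise (fun a b => PySem.Str.len a ≤ PySem.Str.len b)) :
    List.foldl pvMergeStepA [] (pvG cl kws)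
      = (List.range (cl.length + 1)).foldl (pvScanStepB cl kws) [] := by
  rw [pvG, List.foldl_flatMap]
  apply PySem.List.foldl_congr_mem
  intro acc i _
  have hgrp : pvGrp cl kws i
      = ((kws.filter (fun k => pvMatch cl k i)).map (fun k => (i : Int) + PySem.Str.len k)).map
          (fun e => ((i : Int), e)) := by
    rw [pvGrp, List.map_map]; rfl
  have hall : ∀ e ∈ (kws.filter (fun k => pvMatch cl k i)).map (fun k => (i : Int) + PySem.Str.len k),
      (i : Int) ≤ e := by
    intro e he
    obtain ⟨k, -, rfl⟩ := List.mem_map.mp he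
    have := PySem.Str.len_eq k
    omega
  have hpwe : ((kws.filter (fun k => pvMatch cl k i)).map (fun k => (i : Int) + PySem.Str.len k)).Pairwise
      (· ≤ ·) := by
    rw [List.pairwise_map]
    exact (hpw.filter _).imp (fun hab => by omega)
  rw [hgrp, pvMergeGroup _ _ _ hall hpwe]
  rw [pvScanStepB.eq_def]
  have hfold : kws.foldl
      (fun e k => if PySem.Chars.startswith (cl.drop i) k.toList then (i : Int) + PySem.Str.len k else e)
      (-1)
      = ((kws.filter (fun k => pvMatch cl k i)).map (fun k => (i : Int) + PySem.Str.len k)).getLastD (-1) :=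
    pvInnerFold kws (fun k => pvMatch cl k i) _ _
  rw [hfold]
  cases hL : ((kws.filter (fun k => pvMatch cl k i)).map (fun k => (i : Int) + PySem.Str.len k)).getLast? with
  | none =>
    rw [List.getLastD_eq_getLast?, hL]
    norm_num
  | some em =>
    rw [List.getLastD_eq_getLast?, hL]
    have hiem : (i : Int) ≤ em := hall em (List.mem_of_getLast? hL)
    have h0em : (0 : Int) ≤ em := le_trans (by positivity) hiem
    simp only [Option.getD_some, if_pos h0em]
    cases acc with
    | nil => rfl
    | cons hd rest =>
      obtain ⟨ls, le⟩ := hd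
      show pvMergeStepA ((ls, le) :: rest) ((i : Int), em)
          = if (i : Int) ≤ le then (if le < em then (ls, em) :: rest else (ls, le) :: rest)
            else ((i : Int), em) :: (ls, le) :: rest
      rw [pvMergeStepA]
      have hm : max le ((i : Int), em).2 = max le em := rfl
      rw [hm]
      by_cases h : (i : Int) ≤ le
      · rw [if_pos h, if_pos h]
        have : max le em = if le < em then em else le := by omega
        rw [this]
        by_cases h2 : le < em
        · rw [if_pos h2, if_pos h2]
        · rw [if_neg h2, if_neg h2]
      · rw [if_neg h, if_neg h]

-- ===== VERDICT (by name: the statement is the Claim_ definition above) =====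
theorem find_keyword_positions_py_spec : Claim_equal_find_keyword_positions_py := by
  intro content keywords _
  unfold Spec_find_keyword_positions_py
  unfold find_keyword_positions_py find_keyword_positions_py_alt
  simp only []
  rw [pvPositions_eq, pvSorted2_eq_sorted_toLex,
    pvSorted_eq_of_perm_of_pairwise _ _
      ((pvPerm _ _ _ (PySem.List.sorted_perm keywords (fun k => PySem.Str.len k) false)).symm)
      (pvG_pairwise _ _),
    pvMerge_G_eq_scan _ _ (PySem.List.sorted_pairwise keywords (fun k => PySem.Str.len k))]
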